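-- pv_equiv track=rewrite | github.com/BenishaRusselRaj/Mini-Projects | tic-tac-toe.py | pos_dict
-- ===== SOURCE A (Python) =====
-- def pos_dict(board):
--     n = 0
--     pos_lib = {}
--     for i in range(len(board)):
--         for j in range(len(board)):
--             pos_lib[n]=(i,j)
--             n+=1
--     return pos_lib
-- ===== SOURCE B (Python) =====
-- def pos_dict(board):
--     size = len(board)
--     cols = list(range(size)) * size        # column pattern 0..size-1 repeated size times
--     rows = sorted(cols)                    # row pattern: each i repeated size times, in order
--     return dict(enumerate(zip(rows, cols)))
-- ===== Notes on version B (the rewrite author's own statement) =====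
-- stated objective: alternative
-- what changed: Instead of nested i/j loops with a running counter, B builds the whole column stream by list repetition (list(range(size))*size) and the whole row stream by sorting that repetition, then zips the two streams and enumerates them into the dict in one shot.
import Mathlib
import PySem

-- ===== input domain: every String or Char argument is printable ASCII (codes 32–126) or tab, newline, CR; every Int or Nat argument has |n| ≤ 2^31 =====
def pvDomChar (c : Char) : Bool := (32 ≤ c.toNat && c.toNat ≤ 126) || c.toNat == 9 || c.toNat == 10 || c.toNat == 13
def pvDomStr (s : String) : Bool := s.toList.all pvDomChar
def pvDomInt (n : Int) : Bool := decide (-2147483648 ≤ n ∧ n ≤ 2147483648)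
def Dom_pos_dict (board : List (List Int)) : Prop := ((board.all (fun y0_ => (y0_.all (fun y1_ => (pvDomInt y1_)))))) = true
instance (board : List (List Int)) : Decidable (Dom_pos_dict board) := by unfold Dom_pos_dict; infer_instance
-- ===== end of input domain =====

-- B drops A's nested loops and running counter: it builds the column stream by list repetition,
-- the row stream by sorting that repetition, and zips + enumerates the two streams into the dict (alternative; same cost class).

-- ===== PORT A =====
-- nested for-loops over range(len(board)); running counter n; dict insertion pos_lib[n] = (i, j); returns the dict (as its items list)
def pos_dict (board : List (List Int)) : List (Int × Int × Int) :=
  let st :=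
    (PySem.List.pyRange 0 (PySem.List.len board) 1).foldl
      (fun (st : Int × PySem.Dict Int (Int × Int)) i =>
        (PySem.List.pyRange 0 (PySem.List.len board) 1).foldl
          (fun st j => (st.1 + 1, st.2.insert st.1 (i, j))) st)
      (0, PySem.Dict.empty)
  st.2.items

-- ===== PORT B =====
-- size = len(board); cols = list(range(size)) * size; rows = sorted(cols); dict(enumerate(zip(rows, cols)))
def pos_dict_alt (board : List (List Int)) : List (Int × Int × Int) :=
  let size := PySem.List.len board
  let cols := PySem.List.pyRepeat (PySem.List.pyRange 0 size 1) size
  let rows := PySem.List.sorted cols (fun x => x)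
  (PySem.Dict.ofList (PySem.List.enumerate (rows.zip cols) 0)).items

-- ===== PRECONDITION & SPEC =====
def Spec_pos_dict (board : List (List Int)) (out : List (Int × Int × Int)) : Prop := out = pos_dict_alt board
instance (board : List (List Int)) (out : List (Int × Int × Int)) : Decidable (Spec_pos_dict board out) := by unfold Spec_pos_dict; infer_instance

-- ===== CLAIM (what is proved, stated in full; the proofs are below) =====
def Claim_equal_pos_dict : Prop := ∀ (board : List (List Int)), Dom_pos_dict board → Spec_pos_dict board (pos_dict board)

-- ===== LEMMAS AND PROOFS =====

-- the closed-form cell for linear index t in a size×size grid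
def pvCell (size t : Nat) : Int × Int × Int := ((t : Int), ((t / size : Nat) : Int), ((t % size : Nat) : Int))

-- ===== A-side: the double loop builds the closed-form table =====

-- the inner counter loop is the fold over the enumeration of its list
lemma inner_counter (i : Int) : ∀ (js : List Int) (n : Int) (d : PySem.Dict Int (Int × Int)),
    js.foldl (fun st j => (st.1 + 1, st.2.insert st.1 (i, j))) (n, d)
    = (n + js.length, (PySem.List.enumerate js n).foldl (fun d' p => d'.insert p.1 (i, p.2)) d) := by
  intro js
  induction js with
  | nil => intro n d; simp [PySem.List.enumerate_nil]
  | cons j js ih =>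
    intro n d
    simp only [List.foldl_cons, PySem.List.enumerate_cons, ih (n + 1)]
    congr 1
    simp only [List.length_cons]
    push_cast
    ring

lemma enum_pyRange (size : Nat) (s : Int) :
    PySem.List.enumerate (PySem.List.pyRange 0 (size : Int) 1) s
    = (List.range size).map (fun j : Nat => (s + (j : Int), (j : Int))) := by
  induction size with
  | zero => simp [PySem.List.pyRange_one_eq_nil]
  | succ m ih =>
    have h : ((m + 1 : Nat) : Int) = (m : Int) + 1 := by push_cast; ring
    rw [h, PySem.List.pyRange_one_succ_right (by positivity), PySem.List.enumerate_append, ih,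
      List.range_succ, List.map_append]
    simp [PySem.List.enumerate_cons, PySem.List.enumerate_nil, PySem.List.length_pyRange_one]

-- one row of fresh strictly increasing keys appends its items
lemma row_items (size : Nat) (i s : Int) (d : PySem.Dict Int (Int × Int))
    (hk : ∀ k ∈ d.keys, k < s) :
    ((PySem.List.enumerate (PySem.List.pyRange 0 (size : Int) 1) s).foldl
        (fun d' p => d'.insert p.1 (i, p.2)) d).items
    = d.items ++ (List.range size).map (fun j : Nat => (s + (j : Int), (i, (j : Int)))) := by
  have h := PySem.Dict.items_foldl_insert_fresh
    (l := PySem.List.enumerate (PySem.List.pyRange 0 (size : Int) 1) s)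
    (k := fun p : Int × Int => p.1) (v := fun p => (i, p.2)) (d := d)
    (by
      intro a ha
      rw [enum_pyRange] at ha
      simp only [List.mem_map, List.mem_range] at ha
      obtain ⟨j, hj, rfl⟩ := ha
      rw [PySem.Dict.contains_eq_decide_mem_keys]
      simp only [decide_eq_false_iff_not]
      intro hmem
      have := hk _ hmem
      omega)
    (by
      rw [enum_pyRange, List.map_map]
      have : ((fun p : Int × Int => p.1) ∘ fun j : Nat => (s + (j : Int), (j : Int)))
          = fun j : Nat => s + (j : Int) := rfl
      rw [this]
      exact List.nodup_range.map (fun a b h => by omega))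
  rw [h, enum_pyRange, List.map_map]
  rfl

-- A's double loop builds exactly the closed-form table, for any outer bound m
lemma outer_all (size : Nat) : ∀ (m : Nat),
    ((PySem.List.pyRange 0 (m : Int) 1).foldl
      (fun (st : Int × PySem.Dict Int (Int × Int)) i =>
        (PySem.List.pyRange 0 (size : Int) 1).foldl
          (fun st j => (st.1 + 1, st.2.insert st.1 (i, j))) st)
      (0, PySem.Dict.empty))
    = (((m * size : Nat) : Int), PySem.Dict.mk ((List.range (m * size)).map (pvCell size))) := by
  intro m
  induction m with
  | zero =>
    rw [Nat.cast_zero, PySem.List.pyRange_one_eq_nil le_rfl]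
    simp [PySem.Dict.empty]
  | succ m ih =>
    have h : ((m + 1 : Nat) : Int) = (m : Int) + 1 := by push_cast; ring
    rw [h, PySem.List.pyRange_one_succ_right (by positivity), List.foldl_append, ih]
    simp only [List.foldl_cons, List.foldl_nil]
    rw [inner_counter]
    have hkeys : ∀ k ∈ (PySem.Dict.mk ((List.range (m * size)).map (pvCell size))).keys,
        k < ((m * size : Nat) : Int) := by
      intro k hk
      simp only [PySem.Dict.keys_mk, List.map_map, List.mem_map, List.mem_range] at hk
      obtain ⟨t, ht, rfl⟩ := hk
      show ((t : Nat) : Int) < _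
      exact_mod_cast ht
    apply Prod.ext
    · show ((m * size : Nat) : Int) + ((PySem.List.pyRange 0 (size : Int) 1).length : Int) = _
      rw [PySem.List.length_pyRange_one]
      push_cast [Nat.succ_mul]
      omega
    · apply PySem.Dict.ext
      rw [row_items size (m : Int) _ _ hkeys]
      show ((List.range (m * size)).map (pvCell size)) ++ _ = _
      have hms : (m + 1) * size = m * size + size := by ring
      rw [hms, List.range_add, List.map_append]
      congr 1
      rw [List.map_map]
      apply List.map_congr_left
      intro j hj
      simp only [List.mem_range] at hj
      simp only [Function.comp_apply, pvCell]
      have h1 : (m * size + j) / size = m := by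
        rw [Nat.add_comm, Nat.add_mul_div_right _ _ (by omega : 0 < size),
          Nat.div_eq_of_lt hj, Nat.zero_add]
      have h2 : (m * size + j) % size = j := by
        rw [Nat.add_comm, Nat.add_mul_mod_self_right]
        exact Nat.mod_eq_of_lt hj
      rw [h1, h2]
      push_cast
      ring_nf

-- ===== B-side: the sorted/zipped streams enumerate to the same table =====

-- the two coordinate streams, described block by block
def pvRowsT (s m : Nat) : List Int := (List.range m).flatMap (fun i => List.replicate s ((i : Nat) : Int))
def pvColsT (s m : Nat) : List Int := (List.range m).flatMap (fun _ => PySem.List.pyRange 0 (s : Int) 1)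

lemma length_pvRowsT (s m : Nat) : (pvRowsT s m).length = m * s := by
  induction m with
  | zero => simp [pvRowsT]
  | succ m ih =>
    simp only [pvRowsT, List.range_succ, List.flatMap_append, List.length_append] at *
    simp [ih, List.length_replicate, Nat.succ_mul]

lemma length_pvColsT (s m : Nat) : (pvColsT s m).length = m * s := by
  induction m with
  | zero => simp [pvColsT]
  | succ m ih =>
    simp only [pvColsT, List.range_succ, List.flatMap_append, List.length_append] at *
    simp [ih, PySem.List.length_pyRange_one, Nat.succ_mul]

-- B's cols literal equals the block description
lemma cols_eq (s : Nat) :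
    PySem.List.pyRepeat (PySem.List.pyRange 0 (s : Int) 1) (s : Int) = pvColsT s s := by
  show (List.replicate ((s : Int)).toNat (PySem.List.pyRange 0 (s : Int) 1)).flatten = _
  rw [Int.toNat_natCast, pvColsT, List.flatMap_def,
    List.map_const', List.length_range]

-- counts: each value a occurs s times per matching block
lemma count_pvRowsT (s : Nat) (a : Int) : ∀ m, (pvRowsT s m).count a
    = s * (((List.range m).map (fun k : Nat => (k : Int))).count a) := by
  intro m
  induction m with
  | zero => simp [pvRowsT]
  | succ m ih =>
    simp only [pvRowsT, List.range_succ, List.flatMap_append, List.count_append,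
      List.map_append, List.flatMap_cons, List.flatMap_nil, List.append_nil,
      List.map_cons, List.map_nil] at *
    rw [ih]
    by_cases hb : a = (m : Int)
    · simp [List.count_replicate, List.count_singleton, hb, Nat.mul_add]
    · have h' : ¬ ((m : Int) = a) := fun h => hb h.symm
      simp [List.count_replicate, h']

lemma count_pvColsT (s : Nat) (a : Int) : ∀ m, (pvColsT s m).count a
    = m * ((PySem.List.pyRange 0 (s : Int) 1).count a) := by
  intro m
  induction m with
  | zero => simp [pvColsT]
  | succ m ih =>
    simp only [pvColsT, List.range_succ, List.flatMap_append, List.count_append,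
      List.flatMap_cons, List.flatMap_nil, List.append_nil] at *
    rw [ih]
    ring

-- the row stream is a permutation of the column stream
lemma rows_perm (s : Nat) : (pvRowsT s s).Perm (pvColsT s s) := by
  rw [List.perm_iff_count]
  intro a
  rw [count_pvRowsT, count_pvColsT, PySem.List.pyRange_zero_nat]

-- the row stream is weakly increasing
lemma rows_pairwise (s : Nat) : (pvRowsT s s).Pairwise (fun x y => x ≤ y) := by
  rw [pvRowsT, List.flatMap_def, List.pairwise_flatten]
  constructor
  · intro l hl
    simp only [List.mem_map, List.mem_range] at hl
    obtain ⟨i, _, rfl⟩ := hl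
    exact List.pairwise_replicate.mpr (Or.inr le_rfl)
  · have : List.Pairwise (· < ·) (List.range s) := List.pairwise_lt_range
    refine (List.pairwise_map.mpr (this.imp ?_))
    intro i j hij x hx y hy
    rw [List.eq_of_mem_replicate hx, List.eq_of_mem_replicate hy]
    exact_mod_cast hij.le

-- so sorted(cols) is exactly the block-described row stream
lemma rows_eq (s : Nat) :
    PySem.List.sorted (pvColsT s s) (fun x => x) = pvRowsT s s :=
  PySem.List.sorted_id_eq_of_perm_of_pairwise _ _ (rows_perm s) (rows_pairwise s)

-- one constant block zipped with one range block
lemma zip_block (s : Nat) (c : Int) :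
    (List.replicate s c).zip (PySem.List.pyRange 0 (s : Int) 1)
    = (List.range s).map (fun j : Nat => (c, (j : Int))) := by
  rw [PySem.List.pyRange_zero_nat]
  have h : List.replicate s c = (List.range s).map (fun _ => c) := by
    rw [List.map_const', List.length_range]
  rw [h, List.zip_map']

-- enumerating a mapped range block
lemma enum_block (s : Nat) (c : Int) : ∀ (base : Int),
    PySem.List.enumerate ((List.range s).map (fun j : Nat => (c, (j : Int)))) base
    = (List.range s).map (fun j : Nat => (base + (j : Int), (c, (j : Int)))) := by
  induction s with
  | zero => simp [PySem.List.enumerate_nil]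
  | succ m ih =>
    intro base
    rw [List.range_succ, List.map_append, List.map_append, PySem.List.enumerate_append, ih]
    simp [PySem.List.enumerate_cons, PySem.List.enumerate_nil]

-- the zipped streams enumerate to the closed-form table
lemma zip_enum (s : Nat) : ∀ m,
    PySem.List.enumerate ((pvRowsT s m).zip (pvColsT s m)) 0
    = (List.range (m * s)).map (pvCell s) := by
  intro m
  induction m with
  | zero => simp [pvRowsT, pvColsT, PySem.List.enumerate_nil]
  | succ m ih =>
    have hrows : pvRowsT s (m + 1) = pvRowsT s m ++ List.replicate s ((m : Nat) : Int) := by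
      simp [pvRowsT, List.range_succ]
    have hcols : pvColsT s (m + 1) = pvColsT s m ++ PySem.List.pyRange 0 (s : Int) 1 := by
      simp [pvColsT, List.range_succ]
    rw [hrows, hcols, List.zip_append (by rw [length_pvRowsT, length_pvColsT]),
      PySem.List.enumerate_append, ih, zip_block, enum_block]
    have hlen : ((pvRowsT s m).zip (pvColsT s m)).length = m * s := by
      rw [List.length_zip, length_pvRowsT, length_pvColsT, Nat.min_self]
    rw [hlen]
    have hms : (m + 1) * s = m * s + s := by ring
    rw [hms, List.range_add, List.map_append]
    congr 1
    rw [List.map_map]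
    apply List.map_congr_left
    intro j hj
    simp only [List.mem_range] at hj
    simp only [Function.comp_apply, pvCell]
    have h1 : (m * s + j) / s = m := by
      rw [Nat.add_comm, Nat.add_mul_div_right _ _ (by omega : 0 < s),
        Nat.div_eq_of_lt hj, Nat.zero_add]
    have h2 : (m * s + j) % s = j := by
      rw [Nat.add_comm, Nat.add_mul_mod_self_right]
      exact Nat.mod_eq_of_lt hj
    rw [h1, h2]
    push_cast
    ring_nf

-- a pair list with distinct keys round-trips through dict()
lemma items_ofList_nodup {ν : Type} (l : List (Int × ν)) (h : (l.map Prod.fst).Nodup) :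
    (PySem.Dict.ofList l).items = l := by
  show ((PySem.Dict.empty : PySem.Dict Int ν).update l).items = l
  show (l.foldl (fun acc p => acc.insert p.1 p.2) PySem.Dict.empty).items = l
  rw [PySem.Dict.items_foldl_insert_fresh l Prod.fst Prod.snd PySem.Dict.empty
    (fun a _ => PySem.Dict.contains_empty _) h]
  simp [PySem.Dict.empty]

-- ===== VERDICT (by name: the statement is the Claim_ definition above) =====
theorem pos_dict_spec : Claim_equal_pos_dict := by
  intro board _
  unfold Spec_pos_dict pos_dict pos_dict_alt
  simp only [PySem.List.len_eq]
  rw [outer_all board.length board.length]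
  rw [cols_eq, rows_eq, zip_enum]
  rw [items_ofList_nodup]
  rw [List.map_map]
  exact List.nodup_range.map (fun a b h => by simpa [pvCell, Function.comp] using h)
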